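-- pv_equiv track=rewrite | github.com/ucsbdeepspace/cofe-fts-ground-code-archive | ground/groundstation/devices.py | increasing_indices
-- ===== SOURCE A (Python) =====
-- def increasing_indices( array ):
--     """Returns the indices of the given array that make it strictly increasing."""
--     current_max = array[0]
--     result = [0]
--     for i,x in enumerate(array[1:]):
--         if x > current_max:
--             current_max = x
--             result.append(i)
--     return result
-- ===== SOURCE B (Python) =====
-- def increasing_indices(array):
--     """Returns the indices of the given array that make it strictly increasing."""
--     # Prefix-maximum table: prefix_max[i] = max(array[:i+1]).
--     prefix_max = array[:1]
--     for x in array[1:]: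
--         prefix_max.append(max(prefix_max[-1], x))
--     # A tail element is kept exactly when it beats the maximum of everything before it.
--     return [0] + [i for i, (m, x) in enumerate(zip(prefix_max, array[1:])) if x > m]
-- ===== Notes on version B (the rewrite author's own statement) =====
-- stated objective: alternative
-- what changed: Replaces A's inline running-max-and-append single pass by building a prefix-maximum table first and then, in a separate pass, enumerating each tail element zipped with the maximum of everything before it and keeping the positions that beat it; Pre_ excludes only the empty list, on which A raises IndexError reading the first element.
import Mathlib
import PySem

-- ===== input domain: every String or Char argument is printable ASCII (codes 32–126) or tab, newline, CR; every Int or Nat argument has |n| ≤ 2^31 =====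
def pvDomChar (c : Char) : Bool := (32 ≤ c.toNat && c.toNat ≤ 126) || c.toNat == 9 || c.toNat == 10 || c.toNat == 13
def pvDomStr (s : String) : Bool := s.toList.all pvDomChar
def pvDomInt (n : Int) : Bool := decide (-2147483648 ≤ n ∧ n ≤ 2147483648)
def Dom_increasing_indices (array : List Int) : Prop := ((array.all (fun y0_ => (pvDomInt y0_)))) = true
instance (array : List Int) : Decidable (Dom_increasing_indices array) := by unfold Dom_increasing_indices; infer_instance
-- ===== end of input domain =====

-- B changes the decomposition: a prefix-maximum table plus a zip/enumerate comparison pass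
-- instead of A's inline running-max scan; same cost, return values proved equal on nonempty input.

-- ===== PORT A =====
-- for i,x in enumerate(array[1:]): if x > current_max: current_max = x; result.append(i)
def increasing_indices (array : List Int) : List Int :=
  match array with
  | [] => []   -- unreachable under Pre_ (Python raises IndexError reading the first element)
  | a :: rest =>
    let st := (PySem.List.enumerate rest 0).foldl
      (fun (s : Int × List Int) (p : Int × Int) =>
        if p.2 > s.1 then (p.2, s.2 ++ [p.1]) else s)
      (a, [(0 : Int)])
    st.2

-- ===== PORT B =====
-- Pass 1 of Source B: prefix_max = array[:1]; for x in array[1:]: prefix_max.append(max(prefix_max[-1], x))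
-- (the recursion carries prefix_max[-1], the last element appended, as `last`)
def pvPrefixMax (last : Int) (xs : List Int) : List Int :=
  match xs with
  | [] => []
  | x :: xs' =>
    let m := max last x
    m :: pvPrefixMax m xs'

def increasing_indices_alt (array : List Int) : List Int :=
  -- prefix_max = array[:1], then the appending loop (recursion carries prefix_max[-1])
  let prefixMax : List Int :=
    match array with
    | [] => []
    | a :: rest => a :: pvPrefixMax a rest
  -- [0] + [i for i, (m, x) in enumerate(zip(prefix_max, array[1:])) if x > m]
  (0 : Int) :: (PySem.List.enumerate (prefixMax.zip array.tail) 0).filterMap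
    (fun p => if p.2.2 > p.2.1 then some p.1 else none)

-- ===== PRECONDITION & SPEC =====
-- Pre_ excludes only the empty list, on which A raises IndexError reading the first element.
def Pre_increasing_indices (array : List Int) : Prop := array ≠ []
instance (array : List Int) : Decidable (Pre_increasing_indices array) := by unfold Pre_increasing_indices; infer_instance
def pvWitness_increasing_indices : List Int := [3, 1, 4, 1, 5, 9, 2, 6]
def Spec_increasing_indices (array : List Int) (out : List Int) : Prop := out = increasing_indices_alt array
instance (array : List Int) (out : List Int) : Decidable (Spec_increasing_indices array out) := by unfold Spec_increasing_indices; infer_instance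

-- ===== CLAIM (what is proved, stated in full; the proofs are below) =====
def Claim_equal_increasing_indices : Prop := ∀ (array : List Int), Dom_increasing_indices array → Pre_increasing_indices array → Spec_increasing_indices array (increasing_indices array)

-- ===== LEMMAS AND PROOFS =====

-- A's fold, peeled off the accumulator, equals B's filterMap over the zipped prefix-max table.
theorem pv_foldA (xs : List Int) : ∀ (cm : Int) (acc : List Int) (i : Int),
    ((PySem.List.enumerate xs i).foldl
      (fun (s : Int × List Int) (p : Int × Int) =>
        if p.2 > s.1 then (p.2, s.2 ++ [p.1]) else s)
      (cm, acc)).2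
    = acc ++ (PySem.List.enumerate ((cm :: pvPrefixMax cm xs).zip xs) i).filterMap
        (fun p => if p.2.2 > p.2.1 then some p.1 else none) := by
  induction xs with
  | nil => intro cm acc i; simp [PySem.List.enumerate_nil]
  | cons x xs ih =>
    intro cm acc i
    rw [PySem.List.enumerate_cons]
    simp only [List.foldl_cons, pvPrefixMax, List.zip_cons_cons, PySem.List.enumerate_cons,
      List.filterMap_cons]
    by_cases h : x > cm
    · have hm : max cm x = x := by omega
      simp only [if_pos h, ih, hm]
      simp
    · have hm : max cm x = cm := by omega
      simp only [if_neg h, ih, hm]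

-- ===== VERDICT (by name: the statement is the Claim_ definition above) =====
theorem increasing_indices_spec : Claim_equal_increasing_indices := by
  intro array _ hpre
  unfold Spec_increasing_indices increasing_indices increasing_indices_alt
  match array with
  | [] => exact absurd rfl hpre
  | a :: rest =>
    simp only [pv_foldA]
    simp
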